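-- pv_equiv track=rewrite | github.com/justani02/Making-of-an-atom | making_an_atom.py | return_final_number_of_particles
-- ===== SOURCE A (Python) =====
-- def return_final_number_of_particles(n, particle_string):
--     stack = []
--
--     for particle in particle_string:
--         if stack and stack[-1] != particle:
--             stack.pop()
--         else:
--             stack.append(particle)
--
--     return len(stack)
-- ===== SOURCE B (Python) =====
-- def return_final_number_of_particles(n, particle_string):
--     # Stage 1: run-length encode the string into (char, run_length) pairs.
--     runs = []
--     for c in particle_string:
--         if runs and runs[-1][0] == c:
--             runs[-1] = (c, runs[-1][1] + 1)
--         else: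
--             runs.append((c, 1))
--     # Stage 2: fold over runs, handling each whole run with one arithmetic step:
--     # a run of k like particles either joins the pile (cnt += k), annihilates
--     # into it (cnt -= k), or overruns it (cnt = k - cnt, pile flips to x).
--     cnt, cur = 0, None
--     for x, k in runs:
--         if cnt == 0 or cur == x:
--             cnt, cur = cnt + k, x
--         elif k <= cnt:
--             cnt -= k
--         else:
--             cnt, cur = k - cnt, x
--     return cnt
-- ===== Notes on version B (the rewrite author's own statement) =====
-- stated objective: alternative
-- what changed: Two staged passes instead of a simulated stack: first run-length encode the string, then fold over the runs handling each whole run of k equal particles with one arithmetic step (join, annihilate, or overrun the current pile).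
import Mathlib
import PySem

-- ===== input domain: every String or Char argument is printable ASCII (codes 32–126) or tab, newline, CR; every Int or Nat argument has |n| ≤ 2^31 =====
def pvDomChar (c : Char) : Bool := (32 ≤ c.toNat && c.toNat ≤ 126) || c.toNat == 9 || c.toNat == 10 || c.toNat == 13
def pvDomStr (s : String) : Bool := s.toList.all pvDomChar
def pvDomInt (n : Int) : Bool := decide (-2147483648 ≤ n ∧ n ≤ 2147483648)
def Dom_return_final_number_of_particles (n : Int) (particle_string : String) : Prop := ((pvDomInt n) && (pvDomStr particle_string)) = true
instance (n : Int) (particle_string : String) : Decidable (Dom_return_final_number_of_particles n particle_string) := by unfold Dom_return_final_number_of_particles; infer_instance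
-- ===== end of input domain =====

-- B replaces A's per-character stack simulation with two staged passes: run-length
-- encode the string, then fold over the runs, handling each whole run with one
-- arithmetic step; objective: alternative.

-- ===== PORT A =====
-- loop body of A's for-loop (push if top equals the particle or stack empty, else pop)
def pvAstep (stack : List Char) (particle : Char) : List Char :=
  if stack ≠ [] ∧ stack.getLast? ≠ some particle then stack.dropLast
  else stack ++ [particle]

def return_final_number_of_particles (n : Int) (particle_string : String) : Int :=
  ((particle_string.toList.foldl pvAstep []).length : Int)

-- ===== PORT B =====
-- stage-1 loop body: extend the run-length encoding by one character
def pvRstep (runs : List (Char × Int)) (c : Char) : List (Char × Int) :=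
  match runs.getLast? with
  | some (x, k) => if x = c then runs.dropLast ++ [(c, k + 1)] else runs ++ [(c, 1)]
  | none => runs ++ [(c, 1)]

-- stage-2 loop body: absorb one whole run (x, k) into the state (cnt, cur)
def pvRunstep (s : Int × Option Char) (r : Char × Int) : Int × Option Char :=
  if s.1 = 0 ∨ s.2 = some r.1 then (s.1 + r.2, some r.1)
  else if r.2 ≤ s.1 then (s.1 - r.2, s.2)
  else (r.2 - s.1, some r.1)

def return_final_number_of_particles_alt (n : Int) (particle_string : String) : Int :=
  let runs := particle_string.toList.foldl pvRstep []
  (runs.foldl pvRunstep (0, none)).1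

-- ===== PRECONDITION & SPEC =====
def Spec_return_final_number_of_particles (n : Int) (particle_string : String) (out : Int) : Prop := out = return_final_number_of_particles_alt n particle_string
instance (n : Int) (particle_string : String) (out : Int) : Decidable (Spec_return_final_number_of_particles n particle_string out) := by unfold Spec_return_final_number_of_particles; infer_instance

-- ===== CLAIM (what is proved, stated in full; the proofs are below) =====
def Claim_equal_return_final_number_of_particles : Prop := ∀ (n : Int) (particle_string : String), Dom_return_final_number_of_particles n particle_string → Spec_return_final_number_of_particles n particle_string (return_final_number_of_particles n particle_string)

-- ===== LEMMAS AND PROOFS =====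

-- proof-internal intermediate: one-character counter step (count, current type)
def pvCstep (s : Int × Option Char) (c : Char) : Int × Option Char :=
  if s.1 = 0 ∨ s.2 = some c then (s.1 + 1, some c) else (s.1 - 1, s.2)

-- A's stack is always homogeneous, so its fold is mirrored by the counter fold.
theorem pvA_eq_cstep (l : List Char) :
    ∀ (st : List Char) (o : Option Char), (∀ x ∈ st, o = some x) →
    ((l.foldl pvAstep st).length : Int) = (l.foldl pvCstep ((st.length : Int), o)).1
    ∧ (∀ x ∈ l.foldl pvAstep st, (l.foldl pvCstep ((st.length : Int), o)).2 = some x) := by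
  induction l with
  | nil => intro st o ho; exact ⟨rfl, by simpa using ho⟩
  | cons p rest ih =>
    intro st o ho
    simp only [List.foldl_cons]
    rcases st with _ | ⟨x, xs⟩
    · -- empty stack: A pushes, counter takes the cnt = 0 branch
      have h1 : pvAstep [] p = [p] := by simp [pvAstep]
      have h2 : pvCstep (((0:Nat) : Int), o) p = (1, some p) := by simp [pvCstep]
      rw [h1, show (([] : List Char).length : Int) = ((0:Nat) : Int) by simp, h2]
      exact ih [p] (some p) (by simp)
    · have hne : (x :: xs : List Char) ≠ [] := by simp
      have hlast : (x :: xs).getLast? = o := by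
        rw [List.getLast?_eq_some_getLast hne]
        exact (ho _ (List.getLast_mem hne)).symm
      have hcne : ¬ (((x :: xs).length : Int) = 0) := by
        simp [List.length_cons]; omega
      by_cases hp : o = some p
      · -- top equals p: both push / increment
        have h1 : pvAstep (x :: xs) p = (x :: xs) ++ [p] := by
          simp [pvAstep, hlast, hp]
        have h2 : pvCstep ((((x :: xs).length : Nat) : Int), o) p
            = (((x :: xs).length : Int) + 1, some p) := by
          simp [pvCstep, hp]
        rw [h1, h2]
        have := ih ((x :: xs) ++ [p]) (some p) (by
          intro y hy
          rcases List.mem_append.1 hy with h1' | h1'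
          · exact (ho y h1') ▸ hp ▸ rfl
          · simp at h1'; simp [h1'])
        simpa [List.length_append, Int.natCast_add] using this
      · -- top differs from p: both pop / decrement
        have h1 : pvAstep (x :: xs) p = (x :: xs).dropLast := by
          simp only [pvAstep, hlast]
          rw [if_pos ⟨hne, by simpa using hp⟩]
        have h2 : pvCstep ((((x :: xs).length : Nat) : Int), o) p
            = (((x :: xs).length : Int) - 1, o) := by
          simp only [pvCstep]
          rw [if_neg (by push_neg; exact ⟨hcne, hp⟩)]
        rw [h1, h2]
        have hlen : ((x :: xs).dropLast.length : Int) = ((x :: xs).length : Int) - 1 := by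
          simp [List.length_dropLast, List.length_cons]
        have := ih ((x :: xs).dropLast) o (fun y hy => ho y (List.dropLast_subset _ hy))
        rw [hlen] at this
        exact this

-- splitting one particle off a run commutes with the counter step (unconditional)
theorem pv_split (s : Int × Option Char) (x : Char) (k : Int) :
    pvRunstep s (x, k + 1) = pvCstep (pvRunstep s (x, k)) x := by
  rcases s with ⟨c, o⟩
  by_cases h1 : c = 0 ∨ o = some x
  · simp only [pvRunstep, pvCstep, if_pos h1]
    simp [Prod.ext_iff]
    omega
  · by_cases h2 : k + 1 ≤ c
    · simp only [pvRunstep, pvCstep, if_neg h1, if_pos h2, if_pos (by omega : k ≤ c)]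
      have hne : ¬ ((c - k = 0) ∨ o = some x) := by
        rcases not_or.1 h1 with ⟨_, ho⟩
        exact not_or.2 ⟨by omega, ho⟩
      simp only [if_neg hne]
      have harith : c - (k + 1) = c - k - 1 := by omega
      rw [harith]
    · by_cases h3 : k ≤ c
      · have hck : c = k := by omega
        simp only [pvRunstep, pvCstep, if_neg h1, if_neg h2, if_pos h3]
        simp [hck]
      · simp only [pvRunstep, pvCstep, if_neg h1, if_neg h2, if_neg h3]
        simp [Prod.ext_iff]
        omega

-- a singleton run behaves exactly like one counter step, given a nonnegative count
theorem pv_one (s : Int × Option Char) (x : Char) (h : 0 ≤ s.1) :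
    pvRunstep s (x, 1) = pvCstep s x := by
  rcases s with ⟨c, o⟩
  simp only at h
  by_cases h1 : c = 0 ∨ o = some x
  · simp only [pvRunstep, pvCstep, if_pos h1]
  · have hc : (1:Int) ≤ c := by
      rcases not_or.1 h1 with ⟨hc0, _⟩
      omega
    simp only [pvRunstep, pvCstep, if_neg h1, if_pos hc]

-- the run fold keeps the count nonnegative when all run lengths are nonnegative
theorem pv_fold_pos (rs : List (Char × Int)) :
    ∀ (s : Int × Option Char), 0 ≤ s.1 → (∀ r ∈ rs, 0 ≤ r.2) →
    0 ≤ (rs.foldl pvRunstep s).1 := by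
  induction rs with
  | nil => intro s hs _; simpa using hs
  | cons r rest ih =>
    intro s hs hr
    simp only [List.foldl_cons]
    refine ih _ ?_ (fun r' h' => hr r' (by simp [h']))
    have hk : 0 ≤ r.2 := hr r (by simp)
    rcases s with ⟨c, o⟩
    simp only [pvRunstep]
    split_ifs <;> simp_all <;> omega

-- every run length produced by the run-length encoding is at least 1
theorem pv_rle_pos (l : List Char) :
    ∀ rs, (∀ r ∈ rs, 1 ≤ r.2) → ∀ r ∈ l.foldl pvRstep rs, 1 ≤ r.2 := by
  induction l with
  | nil => intro rs h; simpa using h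
  | cons c rest ih =>
    intro rs h
    simp only [List.foldl_cons]
    refine ih _ ?_
    intro r hr
    simp only [pvRstep] at hr
    rcases hlast : rs.getLast? with _ | ⟨x, k⟩ <;> rw [hlast] at hr <;> dsimp only at hr
    · rcases List.mem_append.1 hr with h' | h'
      · exact h r h'
      · simp at h'; simp [h']
    · have hk : 1 ≤ k := h (x, k) (List.mem_of_getLast? hlast)
      by_cases hx : x = c
      · rw [if_pos hx] at hr
        rcases List.mem_append.1 hr with h' | h'
        · exact h r (List.dropLast_subset _ h')
        · simp at h'; simp [h']; omega
      · rw [if_neg hx] at hr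
        rcases List.mem_append.1 hr with h' | h'
        · exact h r h'
        · simp at h'; simp [h']

-- extending the encoding by one character = one counter step on the run fold
theorem pv_step (rs : List (Char × Int)) (c : Char) (hpos : ∀ r ∈ rs, 1 ≤ r.2) :
    (pvRstep rs c).foldl pvRunstep (0, none)
      = pvCstep (rs.foldl pvRunstep (0, none)) c := by
  rcases hlast : rs.getLast? with _ | ⟨x, k⟩
  · have hrs : rs = [] := List.getLast?_eq_none_iff.1 hlast
    subst hrs
    simp only [pvRstep, List.getLast?_nil, List.nil_append, List.foldl_cons,
      List.foldl_nil]
    exact pv_one _ _ (by norm_num)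
  · have hrs : rs.dropLast ++ [(x, k)] = rs := by
      have := List.getLast?_eq_some_getLast (l := rs)
        (by rintro rfl; simp at hlast)
      rw [this] at hlast
      have hg : rs.getLast (by rintro rfl; simp at this) = (x, k) := by
        injection hlast
      rw [← hg]
      exact List.dropLast_concat_getLast _
    by_cases hx : x = c
    · subst hx
      have h1 : pvRstep rs x = rs.dropLast ++ [(x, k + 1)] := by
        simp [pvRstep, hlast]
      rw [h1, List.foldl_append]
      simp only [List.foldl_cons, List.foldl_nil]
      rw [pv_split]
      congr 1
      conv_rhs => rw [← hrs]
      rw [List.foldl_append]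
      simp
    · have h1 : pvRstep rs c = rs ++ [(c, 1)] := by
        simp [pvRstep, hlast, hx]
      rw [h1, List.foldl_append]
      simp only [List.foldl_cons, List.foldl_nil]
      exact pv_one _ _ (pv_fold_pos rs (0, none) (by norm_num)
        (fun r h => le_trans (by norm_num) (hpos r h)))

-- main bridge: the staged run fold equals the per-character counter fold
theorem pv_main (l : List Char) :
    (l.foldl pvRstep []).foldl pvRunstep (0, none) = l.foldl pvCstep (0, none) := by
  induction l using List.reverseRecOn with
  | nil => rfl
  | append_singleton l c ih =>
    rw [List.foldl_append, List.foldl_append]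
    simp only [List.foldl_cons, List.foldl_nil]
    rw [pv_step _ _ (pv_rle_pos l [] (by simp)), ih]

-- ===== VERDICT (by name: the statement is the Claim_ definition above) =====
theorem return_final_number_of_particles_spec : Claim_equal_return_final_number_of_particles := by
  intro n ps _
  unfold Spec_return_final_number_of_particles
  unfold return_final_number_of_particles return_final_number_of_particles_alt
  show ((ps.toList.foldl pvAstep []).length : Int)
      = ((ps.toList.foldl pvRstep []).foldl pvRunstep (0, none)).1
  rw [pv_main]
  exact (pvA_eq_cstep ps.toList [] none (by simp)).1
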